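-- pv_equiv track=rewrite | github.com/cbhushan051/upi_hackthon_ph2 | docker_manager.py | get_service_for_file
-- ===== SOURCE A (Python) =====
-- from typing import List, Optional
--
-- def get_service_for_file(file_path: str) -> Optional[str]:
--     """
--     Determine which Docker service should be restarted based on file path.
--
--     Args:
--         file_path: Path to the modified file
--
--     Returns:
--         Service name or None
--     """
--     # Map file paths to service names
--     service_map = {
--         "bene_bank/": "bene_bank",
--         "rem_bank/": "rem_bank",
--         "npci/": "npci",
--         "payee_psp/": "payee_psp",
--         "payer_psp/": "payer_psp",
--     }
--
--     for path_prefix, service_name in service_map.items():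
--         if file_path.startswith(path_prefix):
--             return service_name
--
--     return None
-- ===== SOURCE B (Python) =====
-- from typing import Optional
--
-- _SERVICES = {"bene_bank", "rem_bank", "npci", "payee_psp", "payer_psp"}
--
-- def get_service_for_file(file_path: str) -> Optional[str]:
--     parts = file_path.split("/", 1)
--     if len(parts) == 2 and parts[0] in _SERVICES:
--         return parts[0]
--     return None
-- ===== Notes on version B (the rewrite author's own statement) =====
-- stated objective: idiomatic
-- what changed: B drops the prefix-map scan entirely: it splits the path once at the first '/' and does a single set-membership test on the first segment, instead of A's loop testing five string prefixes.
import Mathlib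
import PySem

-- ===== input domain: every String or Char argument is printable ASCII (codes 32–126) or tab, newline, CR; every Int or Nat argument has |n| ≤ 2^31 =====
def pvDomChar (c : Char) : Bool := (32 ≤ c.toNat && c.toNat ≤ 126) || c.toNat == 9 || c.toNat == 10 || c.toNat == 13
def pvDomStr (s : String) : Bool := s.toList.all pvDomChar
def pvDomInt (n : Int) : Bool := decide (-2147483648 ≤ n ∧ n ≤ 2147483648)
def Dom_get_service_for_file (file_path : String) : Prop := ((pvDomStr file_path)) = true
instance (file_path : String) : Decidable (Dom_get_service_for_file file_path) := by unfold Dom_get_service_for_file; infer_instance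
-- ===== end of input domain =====

-- B replaces A's five-prefix scan with one split of the first path segment and a set membership test (idiomatic; same cost).


-- ===== PORT A =====
-- the 'for path_prefix, service_name in service_map.items()' loop with early return
def gsLoopA (items : List (String × String)) (file_path : String) : Option String :=
  match items with
  | [] => none
  | (path_prefix, service_name) :: rest =>
      if PySem.Str.startswith file_path path_prefix then some service_name
      else gsLoopA rest file_path

def get_service_for_file (file_path : String) : Option String :=
  let service_map : PySem.Dict String String :=
    PySem.Dict.ofList
      [("bene_bank/", "bene_bank"), ("rem_bank/", "rem_bank"), ("npci/", "npci"),
       ("payee_psp/", "payee_psp"), ("payer_psp/", "payer_psp")]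
  gsLoopA (PySem.Dict.items service_map) file_path

-- ===== PORT B =====
def get_service_for_file_alt (file_path : String) : Option String :=
  let services : PySem.Set String :=
    PySem.Set.ofList ["bene_bank", "rem_bank", "npci", "payee_psp", "payer_psp"]
  match PySem.Str.splitMax? file_path "/" 1 with
  | none => none  -- unreachable: separator "/" is nonempty
  | some parts =>
      if parts.length = 2 then
        match PySem.List.pyGet? parts 0 with
        | some h => if PySem.Set.contains services h then some h else none
        | none => none  -- unreachable: split never returns []
      else none

-- ===== PRECONDITION & SPEC =====
def Spec_get_service_for_file (file_path : String) (out : Option String) : Prop := out = get_service_for_file_alt file_path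
instance (file_path : String) (out : Option String) : Decidable (Spec_get_service_for_file file_path out) := by unfold Spec_get_service_for_file; infer_instance

-- ===== CLAIM (what is proved, stated in full; the proofs are below) =====
def Claim_equal_get_service_for_file : Prop := ∀ (file_path : String), Dom_get_service_for_file file_path → Spec_get_service_for_file file_path (get_service_for_file file_path)

-- ===== LEMMAS AND PROOFS =====

-- splitOnMax.go with maxsplit budget 0 copies the rest of the input into the last piece
theorem go_zero_slash (fuel : Nat) (l cur : List Char) (acc : List (List Char)) :
    PySem.Chars.splitOnMax.go ['/'] fuel 0 l cur acc = ((cur.reverse ++ l) :: acc).reverse := by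
  cases fuel with
  | zero => rw [PySem.Chars.splitOnMax.go.eq_def]
  | succ f =>
      cases l with
      | nil => rw [PySem.Chars.splitOnMax.go.eq_def]; simp
      | cons c r => rw [PySem.Chars.splitOnMax.go.eq_def]; simp

-- splitOnMax.go with maxsplit 1 splits at the first '/', if any
theorem go_one_slash (cs : List Char) : ∀ (fuel : Nat) (cur : List Char) (acc : List (List Char)),
    cs.length < fuel →
    PySem.Chars.splitOnMax.go ['/'] fuel 1 cs cur acc =
      if '/' ∈ cs then
        acc.reverse ++ [cur.reverse ++ cs.takeWhile (· != '/'), (cs.dropWhile (· != '/')).tail]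
      else acc.reverse ++ [cur.reverse ++ cs] := by
  induction cs with
  | nil =>
      intro fuel cur acc hf
      cases fuel with
      | zero => omega
      | succ f => rw [PySem.Chars.splitOnMax.go.eq_def]; simp
  | cons c rest ih =>
      intro fuel cur acc hf
      cases fuel with
      | zero => simp at hf
      | succ f =>
          rw [PySem.Chars.splitOnMax.go.eq_def]
          by_cases hc : c = '/'
          · subst hc
            simp only [List.isPrefixOf, List.isPrefixOf_nil_left, Bool.and_true, beq_self_eq_true,
              if_pos, List.drop_one, List.tail_cons]
            simp [go_zero_slash]
          · have hpre : List.isPrefixOf ['/'] (c :: rest) = false := by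
              simp [List.isPrefixOf]
              exact fun h => hc h.symm
            simp only [hpre, Bool.false_eq_true, if_false, one_ne_zero, if_neg]
            rw [ih f (c :: cur) acc (by simpa using hf)]
            have hmc : ¬ ('/' : Char) = c := fun h => hc h.symm
            by_cases hmem : '/' ∈ rest
            · simp [hmem, hmc, hc, List.takeWhile_cons, List.dropWhile_cons]
            · simp [hmem, hmc, hc, List.takeWhile_cons]

-- s.split('/', 1) as takeWhile / dropWhile
theorem splitOnMax_one_slash (cs : List Char) :
    PySem.Chars.splitOnMax cs ['/'] 1 =
      if '/' ∈ cs then [cs.takeWhile (· != '/'), (cs.dropWhile (· != '/')).tail]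
      else [cs] := by
  unfold PySem.Chars.splitOnMax
  rw [if_neg (by omega), show (1 : Int).toNat = 1 from rfl,
    go_one_slash cs (cs.length + 1) [] [] (by omega)]
  split <;> simp

-- startswith (w ++ "/") holds iff '/' occurs and the first segment is exactly w
theorem startswith_slash_iff (w cs : List Char) (hw : '/' ∉ w) :
    List.isPrefixOf (w ++ ['/']) cs = true ↔ '/' ∈ cs ∧ cs.takeWhile (· != '/') = w := by
  rw [List.isPrefixOf_iff_prefix]
  constructor
  · rintro ⟨t, rfl⟩
    have hall : w.takeWhile (· != '/') = w :=
      List.takeWhile_eq_self_iff.mpr (fun x hx => by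
        simp only [bne_iff_ne, ne_eq, decide_eq_true_eq]
        exact fun h => hw (h ▸ hx))
    refine ⟨by simp, ?_⟩
    rw [List.append_assoc, List.takeWhile_append, hall, if_pos rfl]
    simp [List.takeWhile_cons]
  · rintro ⟨hmem, htw⟩
    have hne : cs.dropWhile (· != '/') ≠ [] := by
      intro h
      have := List.dropWhile_eq_nil_iff.mp h '/' hmem
      simp at this
    obtain ⟨d, tl, hd⟩ := List.exists_cons_of_ne_nil hne
    have hpos : 0 < (cs.dropWhile (· != '/')).length := by rw [hd]; simp
    have hdnot := List.dropWhile_get_zero_not (p := (· != '/')) cs hpos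
    have hdslash : d = '/' := by
      have : (cs.dropWhile (· != '/')).get ⟨0, hpos⟩ = d := by simp [hd]
      rw [this] at hdnot
      simpa using hdnot
    refine ⟨tl, ?_⟩
    have := List.takeWhile_append_dropWhile (p := (· != '/')) (l := cs)
    rw [htw, hd, hdslash] at this
    simpa using this

-- A's prefix chain and B's split-and-member test coincide: both name the first '/'-terminated segment
theorem main_eq (fp : String) : get_service_for_file fp = get_service_for_file_alt fp := by
  unfold get_service_for_file get_service_for_file_alt
  dsimp only
  rw [show (PySem.Dict.ofList
      [("bene_bank/", "bene_bank"), ("rem_bank/", "rem_bank"), ("npci/", "npci"),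
       ("payee_psp/", "payee_psp"), ("payer_psp/", "payer_psp")] : PySem.Dict String String).items =
      [("bene_bank/", "bene_bank"), ("rem_bank/", "rem_bank"), ("npci/", "npci"),
       ("payee_psp/", "payee_psp"), ("payer_psp/", "payer_psp")] from rfl]
  simp only [gsLoopA]
  have hsm := PySem.Str.splitMax?_map fp "/" 1
  rw [show ("/" : String).toList = ['/'] from rfl] at hsm
  rw [PySem.Chars.splitMax?, if_neg (by simp), splitOnMax_one_slash] at hsm
  simp only [PySem.Str.startswith_eq, PySem.Chars.startswith,
    show ("bene_bank/" : String).toList = "bene_bank".toList ++ ['/'] from rfl,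
    show ("rem_bank/" : String).toList = "rem_bank".toList ++ ['/'] from rfl,
    show ("npci/" : String).toList = "npci".toList ++ ['/'] from rfl,
    show ("payee_psp/" : String).toList = "payee_psp".toList ++ ['/'] from rfl,
    show ("payer_psp/" : String).toList = "payer_psp".toList ++ ['/'] from rfl,
    startswith_slash_iff "bene_bank".toList fp.toList (by decide),
    startswith_slash_iff "rem_bank".toList fp.toList (by decide),
    startswith_slash_iff "npci".toList fp.toList (by decide),
    startswith_slash_iff "payee_psp".toList fp.toList (by decide),
    startswith_slash_iff "payer_psp".toList fp.toList (by decide)]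
  by_cases hmem : '/' ∈ fp.toList
  · rw [if_pos hmem] at hsm
    cases hps : PySem.Str.splitMax? fp "/" 1 with
    | none => rw [hps] at hsm; simp at hsm
    | some ps =>
        rw [hps] at hsm
        simp only [Option.map_some, Option.some.injEq] at hsm
        cases ps with
        | nil => simp at hsm
        | cons p0 rest =>
          cases rest with
          | nil => simp at hsm
          | cons p1 rest2 =>
            cases rest2 with
            | cons q qs => simp at hsm
            | nil =>
              simp only [List.map_cons, List.map_nil, List.cons.injEq, and_true] at hsm
              obtain ⟨hp0, hp1⟩ := hsm
              have hiff : ∀ w : String, (p0 = w) ↔ (fp.toList.takeWhile (· != '/') = w.toList) := by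
                intro w
                rw [← String.toList_inj, hp0]
              simp only [List.length_cons, List.length_nil, Nat.reduceAdd,
                show PySem.List.pyGet? ([p0, p1] : List String) 0 = some p0 from rfl,
                PySem.Set.contains,
                show (PySem.Set.ofList ["bene_bank", "rem_bank", "npci", "payee_psp",
                  "payer_psp"] : PySem.Set String) =
                  ["bene_bank", "rem_bank", "npci", "payee_psp", "payer_psp"] from rfl,
                List.contains_eq_mem, List.mem_cons, List.not_mem_nil, or_false,
                decide_eq_true_eq, hiff, hmem, true_and, if_pos rfl]
              split_ifs <;> simp_all [hiff] <;> exact ((hiff _).mpr (by decide)).symm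
  · rw [if_neg hmem] at hsm
    cases hps : PySem.Str.splitMax? fp "/" 1 with
    | none => rw [hps] at hsm; simp at hsm
    | some ps =>
        rw [hps] at hsm
        simp only [Option.map_some, Option.some.injEq] at hsm
        cases ps with
        | nil => simp at hsm
        | cons p0 rest =>
          cases rest with
          | cons p1 rest2 => simp at hsm
          | nil => simp [hmem]

-- ===== VERDICT (by name: the statement is the Claim_ definition above) =====
theorem get_service_for_file_spec : Claim_equal_get_service_for_file := by
  intro fp _
  unfold Spec_get_service_for_file
  exact main_eq fp
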